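-- pv_equiv track=rewrite | github.com/U20212419/app_tesis_backend | app/utils/video_pipeline_benchmark.py | sanitize_score_string
-- ===== SOURCE A (Python) =====
-- def sanitize_score_string(s: str) -> str:
--     """Sanitize a score string to keep only digits and at most one dot.
--
--     Args:
--         s (str): Input score string.
--
--     Returns:
--         str: Sanitized score string.
--     """
--     if not s:
--         return ""
--
--     s_out = ""
--     dot_found = False
--
--     for char in s:
--         if char == '.':
--             # Allow only one dot
--             if not dot_found:
--                 s_out += char
--                 dot_found = True
--         elif char.isdigit():
--             s_out += char
--
--     s_out_stripped = s_out.strip('.')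
--     return s_out_stripped
-- ===== SOURCE B (Python) =====
-- def sanitize_score_string(s: str) -> str:
--     """Sanitize a score string to keep only digits and at most one dot."""
--     kept = ''.join(c for c in s if c.isdigit() or c == '.')
--     head, sep, tail = kept.partition('.')
--     return (head + sep + ''.join(c for c in tail if c != '.')).strip('.')
-- ===== Notes on version B (the rewrite author's own statement) =====
-- stated objective: alternative
-- what changed: Replaces the dot_found state flag and accumulator loop with a stateless pipeline: filter to digits/dots, partition at the first dot, drop all later dots from the tail, then strip edge dots.
import Mathlib
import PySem

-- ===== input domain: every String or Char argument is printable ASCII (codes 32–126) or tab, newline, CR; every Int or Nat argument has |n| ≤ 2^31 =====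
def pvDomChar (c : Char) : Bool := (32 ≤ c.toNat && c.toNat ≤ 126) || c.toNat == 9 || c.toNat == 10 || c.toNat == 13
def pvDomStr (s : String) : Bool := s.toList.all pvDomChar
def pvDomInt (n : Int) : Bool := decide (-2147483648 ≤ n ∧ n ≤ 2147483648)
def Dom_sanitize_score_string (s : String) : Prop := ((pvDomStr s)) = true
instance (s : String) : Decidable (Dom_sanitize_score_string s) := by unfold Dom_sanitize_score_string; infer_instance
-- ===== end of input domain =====

-- B replaces A's dot_found flag loop with a stateless filter / partition-at-first-dot / strip pipeline (alternative decomposition, same cost).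

-- ===== PORT A =====
-- the loop body of A: append '.' only when no dot was seen yet, append digits, skip the rest
def pvStepA (st : List Char × Bool) (c : Char) : List Char × Bool :=
  if c = '.' then
    if st.2 = false then (st.1 ++ [c], true) else st
  else if PySem.Chars.isdigit c then (st.1 ++ [c], st.2)
  else st

def sanitize_score_string (s : String) : String :=
  if s.toList = [] then ""
  else
    let r := s.toList.foldl pvStepA ([], false)
    String.ofList (PySem.Chars.stripChars r.1 ['.'])

-- ===== PORT B =====
def sanitize_score_string_alt (s : String) : String :=
  let kept := s.toList.filter (fun c => PySem.Chars.isdigit c || c == '.')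
  -- kept.partition('.'): hand-ported as takeWhile/dropWhile, exact for the single-char separator
  let head := kept.takeWhile (fun c => c != '.')
  let rest := kept.dropWhile (fun c => c != '.')
  let sep : List Char := if rest = [] then [] else ['.']
  let tail : List Char := if rest = [] then [] else rest.tail
  String.ofList (PySem.Chars.stripChars (head ++ sep ++ tail.filter (fun c => c != '.')) ['.'])

-- ===== PRECONDITION & SPEC =====
def Spec_sanitize_score_string (s : String) (out : String) : Prop := out = sanitize_score_string_alt s
instance (s : String) (out : String) : Decidable (Spec_sanitize_score_string s out) := by unfold Spec_sanitize_score_string; infer_instance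

-- ===== CLAIM (what is proved, stated in full; the proofs are below) =====
def Claim_equal_sanitize_score_string : Prop := ∀ (s : String), Dom_sanitize_score_string s → Spec_sanitize_score_string s (sanitize_score_string s)

-- ===== LEMMAS AND PROOFS =====

-- once a dot has been seen, A keeps exactly the digits
theorem pvFoldA_true (l : List Char) : ∀ acc : List Char,
    l.foldl pvStepA (acc, true) = (acc ++ l.filter PySem.Chars.isdigit, true) := by
  induction l with
  | nil => simp
  | cons c l ih =>
    intro acc
    by_cases hc : c = '.'
    · subst hc
      simp [List.foldl_cons, pvStepA, ih, show PySem.Chars.isdigit '.' = false from by decide]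
    · by_cases hd : PySem.Chars.isdigit c = true
      · simp [List.foldl_cons, pvStepA, hc, hd, ih]
      · simp [List.foldl_cons, pvStepA, hc, hd, ih]

-- stripping the dots from the kept digits-and-dots list leaves the digits
theorem pvFilterFilter (l : List Char) :
    (l.filter (fun c => PySem.Chars.isdigit c || c == '.')).filter (fun c => c != '.')
      = l.filter PySem.Chars.isdigit := by
  rw [List.filter_filter]
  apply List.filter_congr
  intro c _
  by_cases hc : c = '.'
  · subst hc; decide
  · have h1 : (c == '.') = false := by simp [hc]
    have h2 : (c != '.') = true := by simp [hc]
    simp [h1, h2]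

-- B's core list built from the input
def pvCore (l : List Char) : List Char :=
  let kept := l.filter (fun c => PySem.Chars.isdigit c || c == '.')
  let head := kept.takeWhile (fun c => c != '.')
  let rest := kept.dropWhile (fun c => c != '.')
  let sep : List Char := if rest = [] then [] else ['.']
  let tail : List Char := if rest = [] then [] else rest.tail
  head ++ sep ++ tail.filter (fun c => c != '.')

theorem pvFoldA_false (l : List Char) : ∀ acc : List Char,
    (l.foldl pvStepA (acc, false)).1 = acc ++ pvCore l := by
  induction l with
  | nil => simp [pvCore]
  | cons c l ih =>
    intro acc
    by_cases hc : c = '.'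
    · subst hc
      have hstep : pvStepA (acc, false) '.' = (acc ++ ['.'], true) := by simp [pvStepA]
      rw [List.foldl_cons, hstep, pvFoldA_true]
      simp [pvCore, ← pvFilterFilter l, List.append_assoc]
    · by_cases hd : PySem.Chars.isdigit c = true
      · have hne : (c != '.') = true := by simp [hc]
        have hstep : pvStepA (acc, false) c = (acc ++ [c], false) := by
          simp [pvStepA, hc, hd]
        rw [List.foldl_cons, hstep, ih]
        simp [pvCore, hd, hne, List.append_assoc]
      · have hne : (c != '.') = true := by simp [hc]
        have hstep : pvStepA (acc, false) c = (acc, false) := by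
          simp [pvStepA, hc, hd]
        have hk : List.filter (fun x => PySem.Chars.isdigit x || x == '.') (c :: l)
                = List.filter (fun x => PySem.Chars.isdigit x || x == '.') l := by
          simp [hd, hc]
        rw [List.foldl_cons, hstep, ih]
        simp only [pvCore]
        rw [hk]

-- ===== VERDICT (by name: the statement is the Claim_ definition above) =====
theorem sanitize_score_string_spec : Claim_equal_sanitize_score_string := by
  intro s _
  unfold Spec_sanitize_score_string sanitize_score_string sanitize_score_string_alt
  by_cases h : s.toList = []
  · simp [h]
    decide
  · simp only [h]
    have := pvFoldA_false s.toList []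
    simp only [List.nil_append] at this
    rw [this]
    rfl
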